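-- pv_equiv track=rewrite | github.com/special-linear/eqpfit | eqpfit/fit.py | _find_consecutive_run
-- ===== SOURCE A (Python) =====
-- from typing import Dict, Iterable, List, Optional, Sequence, Tuple, Union
--
-- def _find_consecutive_run(ts: List[int], needed: int) -> Optional[int]:
--     if needed <= 0:
--         return 0
--     for i in range(len(ts) - needed + 1):
--         ok = True
--         for j in range(1, needed):
--             if ts[i + j] != ts[i] + j:
--                 ok = False
--                 break
--         if ok:
--             return i
--     return None
-- ===== SOURCE B (Python) =====
-- def _find_consecutive_run(ts, needed):
--     # Single pass: track the start of the current maximal consecutive run.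
--     if needed <= 0:
--         return 0
--     run_start = 0
--     prev = None
--     for k, v in enumerate(ts):
--         if prev is not None and v != prev + 1:
--             run_start = k
--         if k - run_start + 1 >= needed:
--             return run_start
--         prev = v
--     return None
-- ===== Notes on version B (the rewrite author's own statement) =====
-- stated objective: alternative
-- what changed: Replaces the nested window-check loops (for each start index, re-scan up to `needed` elements) with a single pass that tracks the start of the current consecutive run and returns it once the run length reaches `needed`; O(n*needed) worst case becomes O(n), though A's early exit makes the measured difference inconsistent.
import Mathlib
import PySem

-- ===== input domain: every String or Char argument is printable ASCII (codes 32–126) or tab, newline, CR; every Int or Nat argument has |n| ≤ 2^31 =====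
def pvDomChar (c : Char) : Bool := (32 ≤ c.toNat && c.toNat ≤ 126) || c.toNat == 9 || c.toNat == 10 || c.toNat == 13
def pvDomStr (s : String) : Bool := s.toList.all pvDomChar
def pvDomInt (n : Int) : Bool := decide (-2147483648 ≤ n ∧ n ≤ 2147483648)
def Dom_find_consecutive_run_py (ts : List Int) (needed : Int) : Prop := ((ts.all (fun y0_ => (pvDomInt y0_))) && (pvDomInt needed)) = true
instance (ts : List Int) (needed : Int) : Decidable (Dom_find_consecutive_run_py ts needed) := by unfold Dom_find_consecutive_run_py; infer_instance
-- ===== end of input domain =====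

-- B replaces A's nested window re-check with a single pass tracking the current
-- consecutive-run start (a single pass instead of nested re-scans); return values are proved equal.


-- ===== PORT A =====
-- inner loop 'for j in range(1, needed): if ts[i+j] != ts[i] + j: ok = False; break'
-- (pyGetD is exact here: every index A actually reads satisfies 0 ≤ i+j < len ts)
def pvOkA (ts : List Int) (i : Int) : List Int → Bool
  | [] => true
  | j :: rest =>
      if PySem.List.pyGetD ts (i + j) 0 ≠ PySem.List.pyGetD ts i 0 + j then false
      else pvOkA ts i rest

-- outer loop 'for i in range(len(ts) - needed + 1): … if ok: return i'
def pvLoopA (ts : List Int) (needed : Int) : List Int → Option Int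
  | [] => none
  | i :: rest =>
      if pvOkA ts i (PySem.List.pyRange 1 needed 1) then some i
      else pvLoopA ts needed rest

def find_consecutive_run_py (ts : List Int) (needed : Int) : Option Int :=
  if needed ≤ 0 then some 0
  else pvLoopA ts needed (PySem.List.pyRange 0 ((ts.length : Int) - needed + 1) 1)

-- ===== PORT B =====
-- single pass over 'enumerate(ts)' with state (k, run_start, prev)
def pvLoopB (needed : Int) : List Int → Int → Int → Option Int → Option Int
  | [], _, _, _ => none
  | v :: rest, k, run_start, prev =>
      let rs : Int :=
        match prev with
        | some p => if v ≠ p + 1 then k else run_start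
        | none => run_start
      if needed ≤ k - rs + 1 then some rs
      else pvLoopB needed rest (k + 1) rs (some v)

def find_consecutive_run_py_alt (ts : List Int) (needed : Int) : Option Int :=
  if needed ≤ 0 then some 0
  else pvLoopB needed ts 0 0 none

-- ===== PRECONDITION & SPEC =====
def Spec_find_consecutive_run_py (ts : List Int) (needed : Int) (out : Option Int) : Prop := out = find_consecutive_run_py_alt ts needed
instance (ts : List Int) (needed : Int) (out : Option Int) : Decidable (Spec_find_consecutive_run_py ts needed out) := by unfold Spec_find_consecutive_run_py; infer_instance

-- ===== CLAIM (what is proved, stated in full; the proofs are below) =====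
def Claim_equal_find_consecutive_run_py : Prop := ∀ (ts : List Int) (needed : Int), Dom_find_consecutive_run_py ts needed → Spec_find_consecutive_run_py ts needed (find_consecutive_run_py ts needed)

-- ===== LEMMAS AND PROOFS =====

-- "window starting at i is consecutive" (what A's inner loop checks)
def pvP (ts : List Int) (d : Int) (i : Int) : Bool :=
  (PySem.List.pyRange 1 d 1).all
    (fun m => PySem.List.pyGetD ts (i + m) 0 == PySem.List.pyGetD ts i 0 + m)

lemma pvP_iff (ts : List Int) (d i : Int) :
    pvP ts d i = true ↔
      ∀ m : Int, 1 ≤ m → m < d →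
        PySem.List.pyGetD ts (i + m) 0 = PySem.List.pyGetD ts i 0 + m := by
  simp [pvP, List.all_eq_true, PySem.List.mem_pyRange_one]

-- reference: first index ≥ a satisfying P, among the next c indices
def pvFirst (P : Int → Bool) : Int → ℕ → Option Int
  | _, 0 => none
  | i, c + 1 => if P i then some i else pvFirst P (i + 1) c

lemma pvFirst_none (P : Int → Bool) (c : ℕ) (i : Int)
    (h : ∀ y, i ≤ y → y < i + c → P y = false) : pvFirst P i c = none := by
  induction c generalizing i with
  | zero => rfl
  | succ c ih =>
      simp only [pvFirst]
      rw [h i (le_refl i) (by push_cast; omega), if_neg (Bool.false_ne_true)]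
      exact ih (i + 1) (fun y h1 h2 => by
        have : ((c : Int) + 1) = ((c + 1 : ℕ) : Int) := by push_cast; omega
        exact h y (by omega) (by push_cast at h2 ⊢; omega))

lemma pvFirst_some (P : Int → Bool) (c : ℕ) (i x : Int)
    (h1 : i ≤ x) (h2 : x < i + c) (hx : P x = true)
    (hmin : ∀ y, i ≤ y → y < x → P y = false) : pvFirst P i c = some x := by
  induction c generalizing i with
  | zero => simp at h2; omega
  | succ c ih =>
      simp only [pvFirst]
      by_cases hi : i = x
      · subst hi; rw [hx]; simp
      · rw [hmin i (le_refl i) (by omega), if_neg (Bool.false_ne_true)]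
        exact ih (i + 1) (by omega) (by push_cast at h2 ⊢; omega)
          (fun y hy1 hy2 => hmin y (by omega) hy2)

lemma pvOkA_eq_all (ts : List Int) (i : Int) (js : List Int) :
    pvOkA ts i js =
      js.all (fun m => PySem.List.pyGetD ts (i + m) 0 == PySem.List.pyGetD ts i 0 + m) := by
  induction js with
  | nil => rfl
  | cons j rest ih =>
      simp only [pvOkA, List.all_cons]
      by_cases h : PySem.List.pyGetD ts (i + j) 0 = PySem.List.pyGetD ts i 0 + j
      · simp [h, ih]
      · simp [h]

lemma pvOkA_eq_pvP (ts : List Int) (d i : Int) :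
    pvOkA ts i (PySem.List.pyRange 1 d 1) = pvP ts d i := by
  rw [pvOkA_eq_all]; rfl

lemma pvLoopA_eq_first (ts : List Int) (d : Int) (c : ℕ) :
    ∀ a b : Int, (b - a).toNat = c →
      pvLoopA ts d (PySem.List.pyRange a b 1) = pvFirst (pvP ts d) a c := by
  induction c with
  | zero =>
      intro a b h
      rw [PySem.List.pyRange_one_eq_nil (by omega)]
      rfl
  | succ c ih =>
      intro a b h
      rw [PySem.List.pyRange_one_cons (by omega)]
      simp only [pvLoopA, pvFirst, pvOkA_eq_pvP]
      by_cases hp : pvP ts d a = true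
      · simp [hp]
      · rw [if_neg hp, if_neg hp]
        exact ih (a + 1) b (by omega)

-- the big invariant for B's single pass
lemma pvLoopB_inv (ts : List Int) (d : Int) (hd : 1 ≤ d) :
    ∀ c m : ℕ, ts.length - m = c → m ≤ ts.length →
    ∀ rs : Int, 0 ≤ rs → rs ≤ m →
    ∀ prev : Option Int,
      prev = (if m = 0 then none else some (PySem.List.pyGetD ts ((m : Int) - 1) 0)) →
      (∀ x : Int, rs ≤ x → x < m →
        PySem.List.pyGetD ts x 0 = PySem.List.pyGetD ts rs 0 + (x - rs)) →
      (0 < rs → rs < m ∧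
        PySem.List.pyGetD ts rs 0 ≠ PySem.List.pyGetD ts (rs - 1) 0 + 1) →
      (∀ i : Int, 0 ≤ i → i + d ≤ m → pvP ts d i = false) →
      ((m : Int) - rs + 1 ≤ d) →
      pvLoopB d (ts.drop m) m rs prev =
        pvFirst (pvP ts d) 0 ((ts.length : Int) - d + 1).toNat := by
  intro c
  induction c with
  | zero =>
      intro m hc hm rs hrs0 hrsk prev hprev hrun hmax hno hlen
      have hm' : m = ts.length := by omega
      subst hm'
      rw [List.drop_length]
      show none = _
      symm
      apply pvFirst_none
      intro y hy0 hylt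
      exact hno y hy0 (by omega)
  | succ c ih =>
      intro m hc hm rs hrs0 hrsk prev hprev hrun hmax hno hlen
      have hmlt : m < ts.length := by omega
      have hv : PySem.List.pyGetD ts (m : Int) 0 = ts[m] := by
        rw [PySem.List.pyGetD_natCast]
        exact List.getD_eq_getElem ts 0 hmlt
      rw [List.drop_eq_getElem_cons hmlt]
      -- shared continuation: state after run_start has been updated to rs'
      have step : ∀ rs' : Int, 0 ≤ rs' → rs' ≤ (m : Int) →
          (∀ x : Int, rs' ≤ x → x < (m : Int) + 1 →
            PySem.List.pyGetD ts x 0 = PySem.List.pyGetD ts rs' 0 + (x - rs')) →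
          (0 < rs' → rs' < (m : Int) + 1 ∧
            PySem.List.pyGetD ts rs' 0 ≠ PySem.List.pyGetD ts (rs' - 1) 0 + 1) →
          ((m : Int) - rs' + 1 ≤ d) →
          (if d ≤ (m : Int) - rs' + 1 then some rs'
           else pvLoopB d (ts.drop (m + 1)) ((m : Int) + 1) rs' (some ts[m])) =
            pvFirst (pvP ts d) 0 ((ts.length : Int) - d + 1).toNat := by
        intro rs' h0 hk hrun' hmax' hb
        by_cases hret : d ≤ (m : Int) - rs' + 1
        · rw [if_pos hret]
          have heq : (m : Int) - rs' + 1 = d := le_antisymm hb hret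
          symm
          apply pvFirst_some _ _ _ _ h0 (by omega)
          · rw [pvP_iff]
            intro mm h1 h2
            have := hrun' (rs' + mm) (by omega) (by omega)
            rw [this]; ring
          · intro y hy0 hylt
            exact hno y hy0 (by omega)
        · rw [if_neg hret]
          have hrs'1 : rs' ≤ (m : Int) + 1 := by omega
          have hno' : ∀ i : Int, 0 ≤ i → i + d ≤ (m : Int) + 1 → pvP ts d i = false := by
            intro i hi0 hid
            by_cases hsm : i + d ≤ (m : Int)
            · exact hno i hi0 hsm
            · have hieq : i + d = (m : Int) + 1 := by omega
              have hilt : i < rs' := by omega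
              have hrspos : 0 < rs' := by omega
              obtain ⟨hrsm, hbreak⟩ := hmax' hrspos
              by_contra hP
              rw [Bool.not_eq_false, pvP_iff] at hP
              have e1 : PySem.List.pyGetD ts rs' 0 =
                  PySem.List.pyGetD ts i 0 + (rs' - i) := by
                have := hP (rs' - i) (by omega) (by omega)
                rw [show i + (rs' - i) = rs' by ring] at this
                exact this
              have e2 : PySem.List.pyGetD ts (rs' - 1) 0 =
                  PySem.List.pyGetD ts i 0 + (rs' - 1 - i) := by
                by_cases hedge : rs' - 1 = i
                · rw [hedge]; ring
                · have := hP (rs' - 1 - i) (by omega) (by omega)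
                  rw [show i + (rs' - 1 - i) = rs' - 1 by ring] at this
                  exact this
              exact hbreak (by rw [e1, e2]; ring)
          have := ih (m + 1) (by omega) (by omega) rs' h0 (by push_cast; omega)
            (some ts[m])
            (by rw [if_neg (by omega)]
                congr 1
                rw [show ((m + 1 : ℕ) : Int) - 1 = (m : Int) by push_cast; ring, hv])
            (by intro x h1 h2; exact hrun' x h1 (by push_cast at h2 ⊢; omega))
            (by intro h
                obtain ⟨h1, h2⟩ := hmax' h
                exact ⟨by push_cast; omega, h2⟩)
            hno'
            (by push_cast; omega)
          rw [show ((m : Int) + 1) = ((m + 1 : ℕ) : Int) by push_cast; ring]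
          exact this
      -- now dispatch on prev / the reset test
      by_cases hm0 : m = 0
      · subst hm0
        have hrs : rs = 0 := by omega
        subst hrs
        rw [if_pos rfl] at hprev
        subst hprev
        simp only [pvLoopB]
        exact step 0 le_rfl (by omega)
          (by intro x h1 h2
              have hx : x = 0 := by omega
              subst hx; ring)
          (by intro h; omega) (by omega)
      · rw [if_neg hm0] at hprev
        subst hprev
        simp only [pvLoopB]
        by_cases hvp : ts[m] = PySem.List.pyGetD ts ((m : Int) - 1) 0 + 1
        · -- no reset: the run extends through ts[m]
          rw [if_neg (not_not_intro hvp)]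
          apply step rs hrs0 hrsk
          · intro x h1 h2
            by_cases hx : x < (m : Int)
            · exact hrun x h1 hx
            · have hx' : x = (m : Int) := by omega
              subst hx'
              by_cases hrm : rs = (m : Int)
              · rw [hrm]; ring
              · have e := hrun ((m : Int) - 1) (by omega) (by omega)
                rw [hv, hvp, e]; ring
          · intro h
            obtain ⟨h1, h2⟩ := hmax h
            exact ⟨by omega, h2⟩
          · exact hlen
        · -- reset: the run restarts at index m
          rw [if_pos hvp]
          apply step (m : Int) (by omega) le_rfl
          · intro x h1 h2
            have hx : x = (m : Int) := by omega
            subst hx; ring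
          · intro _
            refine ⟨by omega, ?_⟩
            rw [hv]; exact hvp
          · omega

theorem find_consecutive_run_py_eq (ts : List Int) (needed : Int) :
    find_consecutive_run_py ts needed = find_consecutive_run_py_alt ts needed := by
  unfold find_consecutive_run_py find_consecutive_run_py_alt
  by_cases h : needed ≤ 0
  · simp [h]
  · simp only [if_neg h]
    rw [pvLoopA_eq_first ts needed (((ts.length : Int) - needed + 1) - 0).toNat 0 _ (by omega)]
    have := pvLoopB_inv ts needed (by omega) ts.length 0 (by omega) (by omega) 0 le_rfl
      (by simp) none (by simp) (by intro x h1 h2; omega)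
      (by intro hh; omega) (by intro i h1 h2; omega) (by push_cast; omega)
    simp only [List.drop_zero] at this
    rw [show (((ts.length : Int) - needed + 1) - 0) = ((ts.length : Int) - needed + 1) by ring]
    exact this.symm

-- ===== VERDICT (by name: the statement is the Claim_ definition above) =====
theorem find_consecutive_run_py_spec : Claim_equal_find_consecutive_run_py := by
  intro ts needed _
  exact find_consecutive_run_py_eq ts needed
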